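-- pv_equiv track=rewrite | github.com/aledlie/ast-grep-mcp | scripts/import_helpers.py | compute_import_insert_index
-- ===== SOURCE A (Python) =====
-- from typing import List, Sequence, Tuple
--
-- def compute_import_insert_index(lines: Sequence[str]) -> int:
--     """Find insertion index after shebang/docstring."""
--     insert_idx = 0
--
--     for line_index, line in enumerate(lines):
--         stripped = line.strip()
--         if stripped.startswith("#!"):
--             insert_idx = line_index + 1
--         elif stripped.startswith('"""') or stripped.startswith("'''"):
--             quote = '"""' if '"""' in line else "'''"
--             if line.count(quote) >= 2:
--                 insert_idx = line_index + 1
--                 break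
--
--             for next_index in range(line_index + 1, len(lines)):
--                 if quote in lines[next_index]:
--                     insert_idx = next_index + 1
--                     break
--             break
--
--     return insert_idx
-- ===== SOURCE B (Python) =====
-- def compute_import_insert_index(lines):
--     """Find insertion index after shebang/docstring (flat state-machine pass)."""
--     insert_idx = 0
--     quote = None  # None = still looking for shebang/docstring opener; else the closer we seek
--     for idx, line in enumerate(lines):
--         if quote is None:
--             stripped = line.strip()
--             if stripped.startswith("#!"):
--                 insert_idx = idx + 1
--             elif stripped.startswith('"""') or stripped.startswith("'''"):
--                 quote = '"""' if '"""' in line else "'''"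
--                 if line.count(quote) >= 2:
--                     insert_idx = idx + 1
--                     break
--         elif quote in line:
--             insert_idx = idx + 1
--             break
--     return insert_idx
-- ===== Notes on version B (the rewrite author's own statement) =====
-- stated objective: simpler
-- what changed: Replaced A's nested scan (outer enumerate loop plus an inner index loop over range(line_index+1, len(lines)) searching the closing quote) by one flat single pass that keeps a state variable `quote` (None = looking for shebang/docstring opener, else the active closer being sought).
import Mathlib
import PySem

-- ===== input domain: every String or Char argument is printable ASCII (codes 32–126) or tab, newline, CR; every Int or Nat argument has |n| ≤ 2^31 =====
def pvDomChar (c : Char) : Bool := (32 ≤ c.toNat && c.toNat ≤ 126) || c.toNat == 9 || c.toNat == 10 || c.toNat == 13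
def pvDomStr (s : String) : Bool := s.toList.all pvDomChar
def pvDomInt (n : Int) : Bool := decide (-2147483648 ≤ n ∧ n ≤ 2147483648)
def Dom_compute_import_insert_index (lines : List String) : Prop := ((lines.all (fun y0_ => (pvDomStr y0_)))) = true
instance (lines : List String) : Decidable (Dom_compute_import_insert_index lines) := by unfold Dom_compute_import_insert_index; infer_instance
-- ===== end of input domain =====

-- B replaces A's nested scan (inner index loop hunting the closing quote) with one flat
-- state-machine pass; same return value everywhere, objective: simpler.

-- ===== PORT A =====
-- inner loop: for next_index in range(line_index + 1, len(lines)): if quote in lines[next_index]: ...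
def pvInnerA (lines : List String) (quote : String) (insert_idx : Int) : List Int → Int
  | [] => insert_idx
  | j :: rest =>
    if PySem.Str.isIn quote (PySem.List.pyGetD lines j "") then j + 1
    else pvInnerA lines quote insert_idx rest

-- outer loop: for line_index, line in enumerate(lines): ...
def pvOuterA (lines : List String) (i : Nat) (insert_idx : Int) : List String → Int
  | [] => insert_idx
  | line :: rest =>
    let stripped := PySem.Str.strip line
    if PySem.Str.startswith stripped "#!" then
      pvOuterA lines (i + 1) ((i : Int) + 1) rest
    else if PySem.Str.startswith stripped "\"\"\"" || PySem.Str.startswith stripped "'''" then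
      let quote := if PySem.Str.isIn "\"\"\"" line then "\"\"\"" else "'''"
      if 2 ≤ PySem.Str.count line quote then (i : Int) + 1
      else pvInnerA lines quote insert_idx (PySem.List.pyRange ((i : Int) + 1) (lines.length : Int) 1)
    else pvOuterA lines (i + 1) insert_idx rest

def compute_import_insert_index (lines : List String) : Int :=
  pvOuterA lines 0 0 lines

-- ===== PORT B =====
-- single flat pass; state = none while looking for a shebang/docstring opener,
-- state = some quote while hunting the closing triple-quote
def pvLoopB (state : Option String) (insert_idx : Int) (i : Nat) : List String → Int
  | [] => insert_idx
  | line :: rest =>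
    match state with
    | none =>
      let stripped := PySem.Str.strip line
      if PySem.Str.startswith stripped "#!" then
        pvLoopB none ((i : Int) + 1) (i + 1) rest
      else if PySem.Str.startswith stripped "\"\"\"" || PySem.Str.startswith stripped "'''" then
        let quote := if PySem.Str.isIn "\"\"\"" line then "\"\"\"" else "'''"
        if 2 ≤ PySem.Str.count line quote then (i : Int) + 1
        else pvLoopB (some quote) insert_idx (i + 1) rest
      else pvLoopB none insert_idx (i + 1) rest
    | some quote =>
      if PySem.Str.isIn quote line then (i : Int) + 1
      else pvLoopB (some quote) insert_idx (i + 1) rest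

def compute_import_insert_index_alt (lines : List String) : Int :=
  pvLoopB none 0 0 lines

-- ===== PRECONDITION & SPEC =====
def Spec_compute_import_insert_index (lines : List String) (out : Int) : Prop := out = compute_import_insert_index_alt lines
instance (lines : List String) (out : Int) : Decidable (Spec_compute_import_insert_index lines out) := by unfold Spec_compute_import_insert_index; infer_instance

-- ===== CLAIM (what is proved, stated in full; the proofs are below) =====
def Claim_equal_compute_import_insert_index : Prop := ∀ (lines : List String), Dom_compute_import_insert_index lines → Spec_compute_import_insert_index lines (compute_import_insert_index lines)

-- ===== LEMMAS AND PROOFS =====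

-- A's inner index scan from k equals B's close-search state on the suffix from k
theorem pvInner_eq_loopB (lines : List String) (quote : String) (insert_idx : Int) :
    ∀ (k : Nat),
      pvInnerA lines quote insert_idx (PySem.List.pyRange (k : Int) (lines.length : Int) 1)
        = pvLoopB (some quote) insert_idx k (lines.drop k) := by
  intro k
  by_cases hk : k < lines.length
  · induction hn : lines.length - k generalizing k with
    | zero => omega
    | succ n ih =>
      have hlt : (k : Int) < (lines.length : Int) := by exact_mod_cast hk
      rw [PySem.List.pyRange_one_cons hlt]
      rw [List.drop_eq_getElem_cons hk]
      simp only [pvInnerA, pvLoopB, PySem.List.pyGetD_natCast,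
        List.getD_eq_getElem?_getD, List.getElem?_eq_getElem hk, Option.getD_some]
      split_ifs with hin
      · rfl
      · by_cases hk1 : k + 1 < lines.length
        · have := ih (k + 1) hk1 (by omega)
          push_cast at this ⊢
          exact this
        · have hnil : PySem.List.pyRange ((k : Int) + 1) (lines.length : Int) 1 = [] := by
            rw [PySem.List.pyRange_one]
            have : ((lines.length : Int) - ((k : Int) + 1)).toNat = 0 := by omega
            simp [this]
          have hdrop : lines.drop (k + 1) = [] := by
            apply List.drop_eq_nil_of_le; omega
          rw [hnil, hdrop]
          simp [pvInnerA, pvLoopB]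
  · have hnil : PySem.List.pyRange (k : Int) (lines.length : Int) 1 = [] := by
      rw [PySem.List.pyRange_one]
      have : ((lines.length : Int) - (k : Int)).toNat = 0 := by omega
      simp [this]
    have hdrop : lines.drop k = [] := List.drop_eq_nil_of_le (by omega)
    rw [hnil, hdrop]
    simp [pvInnerA, pvLoopB]

-- A's outer loop equals B's opener-search state on the corresponding suffix
theorem pvOuter_eq_loopB (lines : List String) :
    ∀ (rest : List String) (i : Nat) (insert_idx : Int),
      rest = lines.drop i →
      pvOuterA lines i insert_idx rest = pvLoopB none insert_idx i rest := by
  intro rest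
  induction rest with
  | nil => intro i insert_idx _; simp [pvOuterA, pvLoopB]
  | cons line rest' ih =>
    intro i insert_idx hdrop
    have hi : i < lines.length := by
      by_contra h
      rw [List.drop_eq_nil_of_le (by omega)] at hdrop
      exact List.cons_ne_nil _ _ hdrop
    have hrest' : rest' = lines.drop (i + 1) := by
      rw [List.drop_eq_getElem_cons hi] at hdrop
      exact (List.cons.injEq _ _ _ _ ▸ hdrop).2
    simp only [pvOuterA, pvLoopB]
    by_cases h1 : PySem.Str.startswith (PySem.Str.strip line) "#!" = true
    · simp only [h1, if_true]
      exact ih (i + 1) _ hrest'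
    · simp only [h1, if_false, Bool.false_eq_true]
      by_cases h2 : (PySem.Str.startswith (PySem.Str.strip line) "\"\"\""
          || PySem.Str.startswith (PySem.Str.strip line) "'''") = true
      · simp only [h2, if_true]
        split_ifs with hq hc hc
        · rfl
        · rw [hrest']
          have := pvInner_eq_loopB lines "\"\"\"" insert_idx (i + 1)
          push_cast at this
          exact this
        · rfl
        · rw [hrest']
          have := pvInner_eq_loopB lines "'''" insert_idx (i + 1)
          push_cast at this
          exact this
      · simp only [h2, if_false, Bool.false_eq_true]
        exact ih (i + 1) _ hrest'

-- ===== VERDICT (by name: the statement is the Claim_ definition above) =====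
theorem compute_import_insert_index_spec : Claim_equal_compute_import_insert_index := by
  intro lines _
  unfold Spec_compute_import_insert_index compute_import_insert_index compute_import_insert_index_alt
  exact pvOuter_eq_loopB lines lines 0 0 (by simp)
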